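-- pv_equiv track=rewrite | github.com/jovalle/technis | src/tctl/sync.py | _parse_syncthing_pattern
-- ===== SOURCE A (Python) =====
-- def _parse_syncthing_pattern(raw_pattern: str) -> tuple[bool, bool, str]:
--     pattern = raw_pattern.strip()
--     case_insensitive = False
--
--     while pattern.startswith("(?"):
--         close = pattern.find(")")
--         if close <= 2:
--             break
--         opts = pattern[2:close]
--         if "i" in opts:
--             case_insensitive = True
--         pattern = pattern[close + 1 :]
--
--     negated = pattern.startswith("!")
--     if negated:
--         pattern = pattern[1:]
--
--     return negated, case_insensitive, pattern.strip()
-- ===== SOURCE B (Python) =====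
-- import re
--
-- # One anchored regex-engine pass consumes every leading flag group: open-paren,
-- # question mark, a non-empty body without close-paren, close-paren (A's close<=2 stop rule).
-- _FLAG_GROUPS = re.compile(r"(?:\(\?[^)]+\))*")
--
--
-- def _parse_syncthing_pattern(raw_pattern: str) -> tuple[bool, bool, str]:
--     pattern = raw_pattern.strip()
--     m = _FLAG_GROUPS.match(pattern)
--     flags, pattern = pattern[: m.end()], pattern[m.end() :]
--     case_insensitive = "i" in flags
--     negated = pattern.startswith("!")
--     if negated:
--         pattern = pattern[1:]
--     return negated, case_insensitive, pattern.strip()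
-- ===== Notes on version B (the rewrite author's own statement) =====
-- stated objective: idiomatic
-- what changed: The hand-rolled while-loop of startswith/find/slice steps is replaced by a single anchored regex match that consumes all leading flag groups at once; case-insensitivity is read off the matched prefix instead of being accumulated per iteration.
import Mathlib
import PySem

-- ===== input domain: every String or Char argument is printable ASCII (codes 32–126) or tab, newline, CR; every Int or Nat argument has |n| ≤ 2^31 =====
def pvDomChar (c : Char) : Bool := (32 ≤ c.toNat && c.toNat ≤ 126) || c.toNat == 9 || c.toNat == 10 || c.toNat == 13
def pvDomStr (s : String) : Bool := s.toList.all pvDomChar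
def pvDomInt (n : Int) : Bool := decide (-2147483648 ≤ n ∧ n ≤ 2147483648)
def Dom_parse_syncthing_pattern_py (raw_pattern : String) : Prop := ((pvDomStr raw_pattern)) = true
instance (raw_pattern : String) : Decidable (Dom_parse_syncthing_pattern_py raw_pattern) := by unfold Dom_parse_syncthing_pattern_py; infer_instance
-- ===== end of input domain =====

-- B replaces A's while-loop of startswith/find/slice steps by one regex-style pass
-- that consumes all leading flag groups at once (objective: idiomatic).


-- ===== PORT A =====
-- termination fact for A's while loop: the slice pattern[close+1:] is strictly shorter
theorem pvSliceFromLt (pattern : List Char) (close : Int)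
    (hs : PySem.Chars.startswith pattern ['(', '?'] = true) (h2 : ¬ close ≤ 2) :
    (PySem.Chars.slice pattern (some (close + 1)) none).length < pattern.length := by
  have hpre := (PySem.Chars.startswith_iff pattern ['(', '?']).mp hs
  have hlen : 2 ≤ pattern.length := by
    have := hpre.length_le; simpa using this
  have h0 : (0:Int) ≤ close + 1 := by omega
  rw [PySem.Chars.slice_eq_listSlice, PySem.List.slice_from pattern h0]
  have : 1 ≤ (close + 1).toNat := by omega
  simp only [List.length_drop]
  omega

-- the while loop of A, state = (pattern, case_insensitive)
def pvALoop (pattern : List Char) (case_insensitive : Bool) : List Char × Bool :=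
  if h : PySem.Chars.startswith pattern ['(', '?'] = true then
    let close : Int := PySem.Chars.find pattern [')']
    if h2 : close ≤ 2 then (pattern, case_insensitive)
    else
      let opts := PySem.Chars.slice pattern (some 2) (some close)
      let ci := if PySem.Chars.isIn ['i'] opts then true else case_insensitive
      pvALoop (PySem.Chars.slice pattern (some (close + 1)) none) ci
  else (pattern, case_insensitive)
termination_by pattern.length
decreasing_by exact pvSliceFromLt pattern _ h h2

def parse_syncthing_pattern_py (raw_pattern : String) : Bool × Bool × String :=
  let pattern := PySem.Chars.strip raw_pattern.toList
  let res := pvALoop pattern false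
  let pattern := res.1
  let case_insensitive := res.2
  let negated := PySem.Chars.startswith pattern ['!']
  let pattern := if negated then PySem.Chars.slice pattern (some 1) none else pattern
  (negated, case_insensitive, String.ofList (PySem.Chars.strip pattern))

-- ===== PORT B =====
-- hand port of one regex group \(\?[^)]+\) matched at the head (exact for this fixed
-- pattern): returns (matched group chars, rest) or none if no group matches here
def pvChunk (cs : List Char) : Option (List Char × List Char) :=
  match cs with
  | '(' :: '?' :: rest =>
    match rest.dropWhile (fun c => c ≠ ')') with
    | ')' :: tail =>
      if rest.takeWhile (fun c => c ≠ ')') = [] then none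
      else some ('(' :: '?' :: (rest.takeWhile (fun c => c ≠ ')') ++ [')']), tail)
    | _ => none
  | _ => none

theorem pvChunk_some_lt {cs g tail : List Char} (h : pvChunk cs = some (g, tail)) :
    tail.length < cs.length := by
  unfold pvChunk at h
  split at h
  · rename_i rest
    split at h
    · rename_i tl heq
      split at h
      · simp at h
      · have h' : tl = tail := by
          simp only [Option.some.injEq, Prod.mk.injEq] at h
          exact h.2
        subst h'
        have hle := List.length_dropWhile_le (p := fun c => c ≠ ')') (l := rest)
        rw [heq] at hle
        simp only [List.length_cons] at *
        omega
    · simp at h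
  · simp at h

-- hand port of re.match(r'(?:\(\?[^)]+\))*', s) anchored at the start (exact for this
-- fixed pattern): returns (matched prefix, remainder)
def pvMatchFlags (cs : List Char) : List Char × List Char :=
  match h : pvChunk cs with
  | some (g, tail) =>
    let pr := pvMatchFlags tail
    (g ++ pr.1, pr.2)
  | none => ([], cs)
termination_by cs.length
decreasing_by exact pvChunk_some_lt h

def parse_syncthing_pattern_py_alt (raw_pattern : String) : Bool × Bool × String :=
  let pattern := PySem.Chars.strip raw_pattern.toList
  let fr := pvMatchFlags pattern
  let flags := fr.1
  let pattern := fr.2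
  let case_insensitive := PySem.Chars.isIn ['i'] flags
  let negated := PySem.Chars.startswith pattern ['!']
  let pattern := if negated then PySem.Chars.slice pattern (some 1) none else pattern
  (negated, case_insensitive, String.ofList (PySem.Chars.strip pattern))

-- ===== PRECONDITION & SPEC =====
def Spec_parse_syncthing_pattern_py (raw_pattern : String) (out : Bool × Bool × String) : Prop := out = parse_syncthing_pattern_py_alt raw_pattern
instance (raw_pattern : String) (out : Bool × Bool × String) : Decidable (Spec_parse_syncthing_pattern_py raw_pattern out) := by unfold Spec_parse_syncthing_pattern_py; infer_instance

-- ===== CLAIM (what is proved, stated in full; the proofs are below) =====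
def Claim_equal_parse_syncthing_pattern_py : Prop := ∀ (raw_pattern : String), Dom_parse_syncthing_pattern_py raw_pattern → Spec_parse_syncthing_pattern_py raw_pattern (parse_syncthing_pattern_py raw_pattern)

-- ===== LEMMAS AND PROOFS =====

-- a singleton is an infix iff the character occurs
theorem pvSingletonInfix (c : Char) (s : List Char) : [c] <:+: s ↔ c ∈ s := by
  constructor
  · rintro ⟨u, v, rfl⟩; simp
  · intro h
    obtain ⟨u, v, rfl⟩ := List.append_of_mem h
    exact ⟨u, v, by simp⟩

theorem pvIsInSingletonAppend (c : Char) (a b : List Char) :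
    PySem.Chars.isIn [c] (a ++ b) = (PySem.Chars.isIn [c] a || PySem.Chars.isIn [c] b) := by
  cases h1 : PySem.Chars.isIn [c] a <;> cases h2 : PySem.Chars.isIn [c] b <;>
    simp_all [PySem.Chars.isIn_iff_infix, PySem.Chars.isIn_eq_false_iff, pvSingletonInfix]

-- find points at the first occurrence of a single character
theorem pvFindFirst (c : Char) (u v : List Char) (hu : c ∉ u) :
    PySem.Chars.find (u ++ c :: v) [c] = (u.length : Int) := by
  have hmem : c ∈ u ++ c :: v := by simp
  have hinf : [c] <:+: u ++ c :: v := (pvSingletonInfix c _).mpr hmem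
  have hnn : 0 ≤ PySem.Chars.find (u ++ c :: v) [c] :=
    (PySem.Chars.find_nonneg_iff _ _).mpr hinf
  obtain ⟨hpre, hmin⟩ := PySem.Chars.find_spec hnn
  set k := (PySem.Chars.find (u ++ c :: v) [c]).toNat with hk
  have hatu : [c] <+: (u ++ c :: v).drop u.length := by
    rw [List.drop_left]; exact ⟨v, rfl⟩
  have hkle : k ≤ u.length := by
    by_contra hgt
    exact hmin u.length (by omega) hatu
  have hke : k = u.length := by
    by_contra hne
    have hklt : k < u.length := by omega
    obtain ⟨t, ht⟩ := hpre
    have : (u ++ c :: v).drop k = u.drop k ++ c :: v := by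
      rw [List.drop_append_of_le_length (by omega)]
    rw [this] at ht
    have hne' : u.drop k ≠ [] := by
      intro h0; have := congrArg List.length h0; simp at this; omega
    obtain ⟨x, xs, hx⟩ := List.exists_cons_of_ne_nil hne'
    rw [hx] at ht
    have hxc : x = c := by simpa using congrArg (·.head?) ht.symm
    have : x ∈ u := by
      have : x ∈ u.drop k := by rw [hx]; simp
      exact List.mem_of_mem_drop this
    rw [hxc] at this
    exact hu this
  omega

theorem pvFindNone (c : Char) (s : List Char) (h : c ∉ s) :
    PySem.Chars.find s [c] = -1 := by
  rw [PySem.Chars.find_eq_neg_one_iff]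
  intro hinf
  exact h ((pvSingletonInfix c s).mp hinf)

-- one unfolding step of B's matcher
theorem pvMatchFlags_eq (cs : List Char) :
    pvMatchFlags cs = match h : pvChunk cs with
      | some (g, tail) => ((g ++ (pvMatchFlags tail).1, (pvMatchFlags tail).2) : List Char × List Char)
      | none => ([], cs) := by
  rw [pvMatchFlags]

theorem pvMatchFlags_none {cs : List Char} (h : pvChunk cs = none) :
    pvMatchFlags cs = ([], cs) := by
  rw [pvMatchFlags_eq]
  split
  · rename_i g tail hg; rw [h] at hg; cases hg
  · rfl

theorem pvMatchFlags_some {cs g tail : List Char} (h : pvChunk cs = some (g, tail)) :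
    pvMatchFlags cs = (g ++ (pvMatchFlags tail).1, (pvMatchFlags tail).2) := by
  rw [pvMatchFlags_eq]
  split
  · rename_i g' tail' hg
    rw [h] at hg
    obtain ⟨rfl, rfl⟩ : g = g' ∧ tail = tail' := by simpa using hg
    rfl
  · rename_i hg; rw [h] at hg; cases hg

-- the loop of A computes exactly what B's matcher computes
theorem pvLoopEq : ∀ (n : Nat) (cs : List Char), cs.length ≤ n → ∀ (ci : Bool),
    pvALoop cs ci = ((pvMatchFlags cs).2, ci || PySem.Chars.isIn ['i'] (pvMatchFlags cs).1) := by
  intro n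
  induction n with
  | zero =>
    intro cs hle ci
    have : cs = [] := List.length_eq_zero_iff.mp (by omega)
    subst this
    rw [pvALoop, pvMatchFlags_none rfl]
    simp [PySem.Chars.startswith, show PySem.Chars.isIn ['i'] [] = false from rfl]
  | succ m ih =>
    intro cs hle ci
    by_cases hs : PySem.Chars.startswith cs ['(', '?'] = true
    · obtain ⟨rest, rfl⟩ : ∃ rest, cs = '(' :: '?' :: rest := by
        obtain ⟨t, ht⟩ := (PySem.Chars.startswith_iff cs ['(', '?']).mp hs
        exact ⟨t, ht.symm⟩
      by_cases hmem : ')' ∈ rest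
      · -- rest = body ++ ')' :: tail with ')' ∉ body
        set body := rest.takeWhile (fun c => c ≠ ')') with hbody
        have hne : rest.dropWhile (fun c => c ≠ ')') ≠ [] := by
          intro h0
          have h1 := (List.dropWhile_eq_nil_iff (p := fun c => c ≠ ')') (l := rest)).mp h0
          have := h1 ')' hmem
          simp at this
        obtain ⟨x, xs, hx⟩ := List.exists_cons_of_ne_nil hne
        have hxr : x = ')' := by
          have h9 : (rest.dropWhile (fun c => c ≠ ')')).head? = some x := by rw [hx]; rfl
          have h8 := List.head?_eq_some_head (l := rest.dropWhile (fun c => c ≠ ')')) hne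
          have h7 : (rest.dropWhile (fun c => c ≠ ')')).head hne = x := by
            rw [h8] at h9; simpa using h9
          have hhead := List.head_dropWhile_not (p := fun c => decide (c ≠ ')')) (l := rest) hne
          rw [h7] at hhead
          simpa using hhead
        have htail : rest.dropWhile (fun c => c ≠ ')') = ')' :: xs := by rw [hx, hxr]
        set tail := xs with htl
        have hsplit : rest = body ++ ')' :: tail := by
          rw [hbody, ← htail, List.takeWhile_append_dropWhile]
        have hnb : ')' ∉ body := by
          intro hmb
          have := List.mem_takeWhile_imp (l := rest) (p := fun c => c ≠ ')') (by rw [← hbody]; exact hmb)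
          simp at this
        have hfind : PySem.Chars.find ('(' :: '?' :: rest) [')'] = ((body.length + 2 : Nat) : Int) := by
          have hsh : '(' :: '?' :: rest = ('(' :: '?' :: body) ++ ')' :: tail := by
            rw [hsplit]; simp
          rw [hsh, pvFindFirst ')' ('(' :: '?' :: body) tail (by simp [hnb])]
          push_cast
          simp
          omega
        by_cases hbe : body = []
        · -- "(?)" case: close = 2, loop breaks; chunk rejects the empty body
          have hchunk : pvChunk ('(' :: '?' :: rest) = none := by
            simp only [pvChunk, htail, ← hbody]
            rw [if_pos hbe]
          rw [pvALoop, pvMatchFlags_none hchunk]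
          rw [dif_pos hs]
          simp only [hfind, hbe]
          rw [dif_pos (by norm_num)]
          simp [show PySem.Chars.isIn ['i'] [] = false from rfl]
        · -- a real flag group: both consume it and recurse on tail
          have hclose : ¬ (((body.length + 2 : Nat) : Int) ≤ 2) := by
            have h1 : 0 < body.length := List.length_pos_of_ne_nil hbe
            push_cast
            omega
          have hopts : PySem.Chars.slice ('(' :: '?' :: rest) (some 2) (some ((body.length + 2 : Nat) : Int)) = body := by
            rw [PySem.Chars.slice_eq_listSlice]
            have h2 : (2 : Int) = ((2 : Nat) : Int) := by norm_num
            rw [h2, PySem.List.slice_natCast]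
            simp only [List.drop_succ_cons, List.drop_zero, Nat.add_sub_cancel]
            rw [hsplit, List.take_left]
          have hnext : PySem.Chars.slice ('(' :: '?' :: rest) (some (((body.length + 2 : Nat) : Int) + 1)) none = tail := by
            rw [PySem.Chars.slice_eq_listSlice]
            have hc : (((body.length + 2 : Nat) : Int) + 1) = ((body.length + 3 : Nat) : Int) := by push_cast; ring
            rw [hc, PySem.List.slice_from _ (by positivity)]
            simp only [Int.toNat_natCast]
            show List.drop (body.length + 3) ('(' :: '?' :: rest) = tail
            rw [hsplit]
            rw [show body.length + 3 = body.length + 1 + 1 + 1 from by ring]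
            simp only [List.drop_succ_cons]
            rw [show body.length + 1 = (body ++ [')']).length from by simp]
            rw [show body ++ ')' :: tail = (body ++ [')']) ++ tail from by simp]
            exact List.drop_left
          have hchunk : pvChunk ('(' :: '?' :: rest) = some ('(' :: '?' :: (body ++ [')']), tail) := by
            simp only [pvChunk, htail, ← hbody]
            rw [if_neg hbe]
          have htlen : tail.length ≤ m := by
            have h5 := congrArg List.length hsplit
            simp only [List.length_append, List.length_cons] at h5
            simp only [List.length_cons] at hle
            omega
          rw [pvALoop]
          rw [dif_pos hs]
          simp only [hfind]
          rw [dif_neg hclose]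
          rw [hopts, hnext, ih tail htlen]
          rw [pvMatchFlags_some hchunk]
          simp only [Prod.mk.injEq]
          refine ⟨trivial, ?_⟩
          rw [pvIsInSingletonAppend]
          have hmemiff : ('i' ∈ '(' :: '?' :: (body ++ [')'])) ↔ 'i' ∈ body := by
            simp only [List.mem_cons, List.mem_append]
            constructor
            · rintro (h | h | h | h)
              · exact absurd h (by decide)
              · exact absurd h (by decide)
              · exact h
              · exact absurd h (by decide)
            · intro h
              exact Or.inr (Or.inr (Or.inl h))
          have hgi : PySem.Chars.isIn ['i'] ('(' :: '?' :: (body ++ [')'])) = PySem.Chars.isIn ['i'] body := by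
            cases hbi : PySem.Chars.isIn ['i'] body
            · have hb' : 'i' ∉ body := fun hm =>
                (PySem.Chars.isIn_eq_false_iff _ _).mp hbi ((pvSingletonInfix _ _).mpr hm)
              rw [PySem.Chars.isIn_eq_false_iff]
              intro hinf
              exact hb' (hmemiff.mp ((pvSingletonInfix _ _).mp hinf))
            · have hb' : 'i' ∈ body := (pvSingletonInfix _ _).mp ((PySem.Chars.isIn_iff_infix _ _).mp hbi)
              rw [PySem.Chars.isIn_iff_infix]
              exact (pvSingletonInfix _ _).mpr (hmemiff.mpr hb')
          rw [hgi]
          generalize PySem.Chars.isIn ['i'] body = a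
          generalize PySem.Chars.isIn ['i'] (pvMatchFlags tail).1 = z
          cases a <;> cases ci <;> cases z <;> rfl
      · -- no ')' at all: find = -1, loop breaks; chunk fails
        have hfind : PySem.Chars.find ('(' :: '?' :: rest) [')'] = -1 :=
          pvFindNone ')' _ (by simp [hmem])
        have hchunk : pvChunk ('(' :: '?' :: rest) = none := by
          have hdw : rest.dropWhile (fun c => c ≠ ')') = [] := by
            rw [List.dropWhile_eq_nil_iff]
            intro x hx
            simp only [decide_eq_true_eq]
            intro h; rw [h] at hx; exact hmem hx
          simp only [pvChunk, hdw]
        rw [pvALoop, pvMatchFlags_none hchunk]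
        rw [dif_pos hs]
        simp only [hfind]
        rw [dif_pos (by norm_num)]
        simp [show PySem.Chars.isIn ['i'] [] = false from rfl]
    · -- does not start with "(?": both stop immediately
      have hchunk : pvChunk cs = none := by
        match cs with
        | [] => rfl
        | [c] => simp only [pvChunk]
        | c1 :: c2 :: r =>
          simp only [pvChunk]
          split
          · rename_i heq
            cases heq
            exact absurd (by rw [PySem.Chars.startswith_iff]; exact ⟨r, rfl⟩) hs
          · rfl
      rw [pvALoop, pvMatchFlags_none hchunk]
      rw [dif_neg hs]
      simp [show PySem.Chars.isIn ['i'] [] = false from rfl]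

-- ===== VERDICT (by name: the statement is the Claim_ definition above) =====
theorem parse_syncthing_pattern_py_spec : Claim_equal_parse_syncthing_pattern_py := by
  intro raw_pattern _
  unfold Spec_parse_syncthing_pattern_py
  unfold parse_syncthing_pattern_py parse_syncthing_pattern_py_alt
  simp only [pvLoopEq (PySem.Chars.strip raw_pattern.toList).length
    (PySem.Chars.strip raw_pattern.toList) (le_refl _) false, Bool.false_or]
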